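-- pv_equiv track=rewrite | github.com/JacobFrank714/CSProjects | cs 101/labs/lab10/CrimeDataSolution.py | create_reported_date_dict
-- ===== SOURCE A (Python) =====
-- def create_reported_date_dict(lst):
--     """Returns a dictionary of dates and how many times a crime happened on that date"""
--     report = {}
--     lst1 = []
--     lst.remove(lst[0])
--     for i in range(len(lst)):
--         lst1.append(lst[i][1])
--     for key in lst1:
--         if key in report:
--             report[key] = report[key] + 1
--         else:
--             report[key] = 1
--     return report
-- ===== SOURCE B (Python) =====
-- def _date_runs(dates):
--     """Partition pass: take the first remaining date, drop all its occurrences,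
--     and record (date, how many were dropped); repeat on what is left."""
--     runs = []
--     while dates:
--         d = dates[0]
--         rest = [x for x in dates if x != d]
--         runs.append((d, len(dates) - len(rest)))
--         dates = rest
--     return runs
--
--
-- def create_reported_date_dict(lst):
--     """Returns a dictionary of dates and how many times a crime happened on that date"""
--     lst.remove(lst[0])
--     return dict(_date_runs([row[1] for row in lst]))
-- ===== Notes on version B (the rewrite author's own statement) =====
-- stated objective: alternative
-- what changed: B replaces A's incremental if-in-dict counting loop by a filter-partition pass: repeatedly take the first remaining date, delete all its occurrences with a list filter, record (date, number deleted), and build the dict from the resulting pair list at the end.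
import Mathlib
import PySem

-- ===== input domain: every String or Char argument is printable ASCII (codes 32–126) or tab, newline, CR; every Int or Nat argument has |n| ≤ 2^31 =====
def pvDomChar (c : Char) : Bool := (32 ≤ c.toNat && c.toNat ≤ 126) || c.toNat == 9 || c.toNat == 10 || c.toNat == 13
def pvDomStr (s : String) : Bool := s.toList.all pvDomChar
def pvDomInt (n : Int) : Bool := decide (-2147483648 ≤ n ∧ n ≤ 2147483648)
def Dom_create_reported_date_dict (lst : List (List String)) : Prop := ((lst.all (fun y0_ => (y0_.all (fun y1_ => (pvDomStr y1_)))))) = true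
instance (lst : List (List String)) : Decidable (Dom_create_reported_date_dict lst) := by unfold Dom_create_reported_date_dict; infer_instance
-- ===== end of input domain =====

-- B counts by a filter-partition pass (take the first remaining date, delete all its occurrences,
-- record how many were deleted, repeat) and builds the dict from the pair list at the end — a
-- different algorithm from A's incremental if-in-dict counting; both mutate the caller's lst via
-- lst.remove(lst[0]) identically, and the equivalence proved is about the RETURN value.

-- ===== PORT A =====
def create_reported_date_dict (lst : List (List String)) : List (String × Int) :=
  -- lst.remove(lst[0]) : IndexError on [], excluded by Pre_
  match PySem.List.pyGet? lst 0 with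
  | none => []
  | some h =>
    match PySem.List.remove? lst h with
    | none => []  -- unreachable: h ∈ lst
    | some l =>
      -- for i in range(len(lst)): lst1.append(lst[i][1])   (row[1] in range by Pre_)
      let lst1 : List String :=
        (PySem.List.pyRange 0 (l.length : Int) 1).foldl
          (fun acc i => acc ++ [PySem.List.pyGetD (PySem.List.pyGetD l i []) 1 ""]) []
      -- for key in lst1: if key in report: report[key] = report[key] + 1 else: report[key] = 1
      let report : PySem.Dict String Int :=
        lst1.foldl
          (fun d k => if d.contains k then d.insert k (d.getD k 0 + 1) else d.insert k 1)
          PySem.Dict.empty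
      report.items

-- ===== PORT B =====
-- _date_runs: while dates: d = dates[0]; rest = [x for x in dates if x != d];
--             runs.append((d, len(dates) - len(rest))); dates = rest
def pvDateRuns (dates : List String) (runs : List (String × Int)) : List (String × Int) :=
  match dates with
  | [] => runs
  | d :: ds =>
    let rest := (d :: ds).filter (fun x => !(x == d))
    pvDateRuns rest (runs ++ [(d, ((d :: ds).length : Int) - (rest.length : Int))])
termination_by dates.length
decreasing_by
  simp only [List.filter_cons, beq_self_eq_true, Bool.not_true, List.length_cons]
  exact Nat.lt_succ_of_le (List.length_filter_le _ _)

def create_reported_date_dict_alt (lst : List (List String)) : List (String × Int) :=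
  -- lst.remove(lst[0]) : IndexError on [], excluded by Pre_
  match PySem.List.pyGet? lst 0 with
  | none => []
  | some h =>
    match PySem.List.remove? lst h with
    | none => []  -- unreachable: h ∈ lst
    | some l =>
      -- dict(_date_runs([row[1] for row in lst]))
      ((pvDateRuns (l.map (fun row => PySem.List.pyGetD row 1 "")) []).foldl
        (fun d kv => d.insert kv.1 kv.2) PySem.Dict.empty).items

-- ===== PRECONDITION & SPEC =====
-- Pre_ excludes exactly the inputs where the Python raises IndexError: the empty list
-- (lst[0]) and inputs with a row of length < 2 after the removed head (row[1]).
def Pre_create_reported_date_dict (lst : List (List String)) : Prop :=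
  lst ≠ [] ∧ ∀ r ∈ lst.tail, 2 ≤ r.length
instance (lst : List (List String)) : Decidable (Pre_create_reported_date_dict lst) := by
  unfold Pre_create_reported_date_dict; infer_instance

def pvWitness_create_reported_date_dict : List (List String) :=
  [["id", "date"], ["1", "2020-01-01"], ["2", "2020-01-01"], ["3", "2020-01-02"]]

def Spec_create_reported_date_dict (lst : List (List String)) (out : List (String × Int)) : Prop :=
  out = create_reported_date_dict_alt lst
instance (lst : List (List String)) (out : List (String × Int)) : Decidable (Spec_create_reported_date_dict lst out) := by
  unfold Spec_create_reported_date_dict; infer_instance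

-- ===== CLAIM (what is proved, stated in full; the proofs are below) =====
def Claim_equal_create_reported_date_dict : Prop :=
  ∀ (lst : List (List String)), Dom_create_reported_date_dict lst →
    Pre_create_reported_date_dict lst →
    Spec_create_reported_date_dict lst (create_reported_date_dict lst)

-- ===== LEMMAS AND PROOFS =====

theorem pv_countP_not (p : String → Bool) (l : List String) :
    l.countP (fun a => !p a) = l.length - l.countP p := by
  induction l with
  | nil => simp
  | cons x xs ih =>
    have hle := List.countP_le_length (p := p) (l := xs)
    by_cases h : p x = true
    · simp [h, ih]
    · simp [h, ih]
      omega

-- ofList commutes with filter (first-occurrence dedup of a filtered list).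
theorem pv_ofList_filter (p : String → Bool) (ds : List String) :
    PySem.Set.ofList (ds.filter p) = (PySem.Set.ofList ds).filter p := by
  induction ds with
  | nil => rfl
  | cons x xs ih =>
    by_cases h : p x = true
    · rw [List.filter_cons_of_pos h, PySem.Set.ofList_cons, PySem.Set.ofList_cons]
      show _ :: List.filter _ _ = List.filter p (x :: List.filter _ _)
      rw [List.filter_cons_of_pos h, ih, List.filter_filter, List.filter_filter]
      exact congrArg (x :: ·) (List.filter_congr (fun a _ => Bool.and_comm _ _))
    · rw [List.filter_cons_of_neg h, PySem.Set.ofList_cons, ih]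
      show _ = List.filter p (x :: List.filter _ _)
      rw [List.filter_cons_of_neg h, List.filter_filter]
      refine List.filter_congr (fun a _ => ?_)
      by_cases ha : a = x
      · subst ha; simp [h]
      · simp [ha]

-- The partition pass lists each distinct date (in first-occurrence order) with its total count.
theorem pv_runs_eq (dates : List String) (runs : List (String × Int)) :
    pvDateRuns dates runs
      = runs ++ (PySem.Set.ofList dates).map (fun k => (k, (dates.count k : Int))) := by
  induction dates, runs using pvDateRuns.induct with
  | case1 runs => simp [pvDateRuns]
  | case2 runs d ds rest ih =>
    rw [pvDateRuns]
    have hrest : rest = ds.filter (fun x => !(x == d)) := by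
      simp [rest]
    rw [ih, hrest]
    have hof : PySem.Set.ofList (d :: ds)
        = d :: PySem.Set.ofList (ds.filter (fun x => !(x == d))) := by
      rw [PySem.Set.ofList_cons, pv_ofList_filter]
      rfl
    rw [hof, List.map_cons, List.append_assoc, List.singleton_append]
    congr 2
    · -- head: len(dates) - len(rest) = dates.count d
      have h1 : (ds.filter (fun x => !(x == d))).length
          = ds.countP (fun x => !(x == d)) := (List.countP_eq_length_filter ..).symm
      have h2 : ds.countP (fun x => !(x == d)) = ds.length - ds.countP (fun x => x == d) :=
        pv_countP_not _ _
      have h3 : ds.countP (fun x => x == d) ≤ ds.length :=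
        List.countP_le_length
      have h4 : ds.count d = ds.countP (fun x => x == d) := rfl
      have h5 : ds.count d ≤ ds.length := List.count_le_length
      simp only [List.count_cons_self, List.length_cons, h1, h2, ← h4]
      exact congrArg (Prod.mk d) (by omega)
    · -- tail: counts inside rest equal counts in the full list for keys ≠ d
      apply List.map_congr_left
      intro k hk
      have hkmem : k ∈ ds.filter (fun x => !(x == d)) := (PySem.Set.mem_ofList _ _).mp hk
      have hkne : (!(k == d)) = true := (List.mem_filter.mp hkmem).2
      have : (ds.filter (fun x => !(x == d))).count k = (d :: ds).count k := by
        rw [List.count_filter (p := fun x => !(x == d)) hkne, List.count_cons_of_ne]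
        intro h; rw [h] at hkne; simp at hkne
      rw [this]

-- A's loop body is the Counter step: when the key is absent, getD yields 0, so insert 1 = insert (getD + 1).
theorem pv_loop_body_eq (d : PySem.Dict String Int) (k : String) :
    (if d.contains k then d.insert k (d.getD k 0 + 1) else d.insert k 1)
      = d.insert k (d.getD k 0 + 1) := by
  by_cases h : d.contains k = true
  · simp [h]
  · simp only [Bool.not_eq_true] at h
    rw [PySem.Dict.getD_of_not_contains d 0 h]
    simp [h]

-- Core: A's incremental counting loop and B's partition pass yield the same items.
theorem pv_main (dates : List String) :
    (dates.foldl
        (fun d k => if d.contains k then d.insert k (d.getD k 0 + 1) else d.insert k 1)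
        PySem.Dict.empty).items
    = ((pvDateRuns dates []).foldl (fun d kv => d.insert kv.1 kv.2) PySem.Dict.empty).items := by
  have hruns := pv_runs_eq dates []
  rw [List.nil_append] at hruns
  rw [PySem.List.foldl_congr_mem dates _ (fun d k => d.insert k (d.getD k 0 + 1)) _
      (fun acc x _ => pv_loop_body_eq acc x),
     PySem.Dict.foldl_insert_getD_add_one_eq_counter,
     PySem.Dict.items_counter, hruns,
     PySem.Dict.items_foldl_insert_fresh _ Prod.fst Prod.snd PySem.Dict.empty
       (fun a _ => PySem.Dict.contains_empty _)
       (by simp only [List.map_map, Function.comp_def]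
           exact List.map_id' _ ▸ PySem.Set.nodup_ofList dates)]
  simp [PySem.Dict.empty]

-- ===== VERDICT (by name: the statement is the Claim_ definition above) =====
theorem create_reported_date_dict_spec : Claim_equal_create_reported_date_dict := by
  intro lst _ hpre
  obtain ⟨hne, _⟩ := hpre
  cases lst with
  | nil => exact absurd rfl hne
  | cons h t =>
    have h0 : PySem.List.pyGet? (h :: t) 0 = some h := by
      simp [PySem.List.pyGet?, PySem.List.pyIdx?]
    unfold Spec_create_reported_date_dict create_reported_date_dict create_reported_date_dict_alt
    rw [h0]
    simp only [PySem.List.remove?_cons_self]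
    rw [PySem.List.foldl_append_singleton_eq_map
      (fun i => PySem.List.pyGetD (PySem.List.pyGetD t i []) 1 ""), List.nil_append]
    have hm : (PySem.List.pyRange 0 (t.length : Int) 1).map
        (fun i => PySem.List.pyGetD (PySem.List.pyGetD t i []) 1 "")
        = t.map (fun r => PySem.List.pyGetD r 1 "") := by
      rw [show (fun i => PySem.List.pyGetD (PySem.List.pyGetD t i []) 1 "")
            = (fun r => PySem.List.pyGetD r 1 "") ∘ (fun j => PySem.List.pyGetD t j []) from rfl,
          ← List.map_map,
          show ((t.length : Int)) = PySem.List.len t from rfl,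
          PySem.List.map_pyGetD_pyRange_zero]
    rw [hm]
    exact pv_main _
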